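-- pv_equiv track=rewrite | github.com/mikeparcewski/wicked-garden | scripts/agentic/pattern_scorer.py | _bfs_depth
-- ===== SOURCE A (Python) =====
-- def _bfs_depth(root, adj):
--     depth = 0
--     level = [root]
--     visited = {root}
--     while level:
--         next_level = []
--         for node in level:
--             for neighbor in adj.get(node, []):
--                 if neighbor not in visited:
--                     visited.add(neighbor)
--                     next_level.append(neighbor)
--         if next_level:
--             depth += 1
--         level = next_level
--     return depth
-- ===== SOURCE B (Python) =====
-- def _bfs_depth(root, adj):
--     # Single-queue BFS over (node, depth) pairs; queue depths are
--     # nondecreasing, so the depth of the last node taken from the queue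
--     # is the BFS depth of the graph.
--     queue = [(root, 0)]
--     visited = {root}
--     depth = 0
--     i = 0
--     while i < len(queue):
--         node, d = queue[i]
--         i += 1
--         depth = d
--         for neighbor in adj.get(node, []):
--             if neighbor not in visited:
--                 visited.add(neighbor)
--                 queue.append((neighbor, d + 1))
--     return depth
-- ===== Notes on version B (the rewrite author's own statement) =====
-- stated objective: alternative
-- what changed: Replaced the level-by-level BFS (explicit frontier lists plus a depth counter incremented per non-empty next level) by a single-queue BFS over (node, depth) pairs that returns the depth of the last node dequeued.
import Mathlib
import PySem

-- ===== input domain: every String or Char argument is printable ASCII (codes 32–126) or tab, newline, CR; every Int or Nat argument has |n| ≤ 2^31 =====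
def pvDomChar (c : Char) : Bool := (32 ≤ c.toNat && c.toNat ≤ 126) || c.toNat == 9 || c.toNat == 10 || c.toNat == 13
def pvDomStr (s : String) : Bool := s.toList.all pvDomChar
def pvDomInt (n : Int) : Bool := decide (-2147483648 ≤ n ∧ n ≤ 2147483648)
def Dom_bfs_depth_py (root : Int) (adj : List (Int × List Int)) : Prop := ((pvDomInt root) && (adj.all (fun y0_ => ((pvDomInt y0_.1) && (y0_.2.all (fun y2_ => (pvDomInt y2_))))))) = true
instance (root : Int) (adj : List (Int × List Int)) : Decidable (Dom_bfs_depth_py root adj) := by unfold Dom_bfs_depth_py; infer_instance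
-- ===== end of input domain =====

-- B replaces A's level-by-level BFS (frontier lists + per-level depth counter) by a
-- single-queue BFS over (node, depth) pairs returning the depth of the last dequeued
-- node; same return value, same cost (objective: alternative).

-- ===== PORT A =====
-- adj.get(node, []) (first-match association-list lookup, per the dict convention)
def pvNbs (adj : List (Int × List Int)) (node : Int) : List Int :=
  PySem.Dict.getD (PySem.Dict.mk adj) node []

-- body of A's "for node in level: for neighbor in adj.get(node, []): …",
-- state = (visited, next_level)
def pvStepA (adj : List (Int × List Int)) (st : PySem.Set Int × List Int) (node : Int) :
    PySem.Set Int × List Int :=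
  (pvNbs adj node).foldl
    (fun st' nb => if st'.1.contains nb then st' else (st'.1.add nb, st'.2 ++ [nb])) st

-- A's while-loop; the fuel ((number of neighbour entries)+2) only makes the loop total,
-- it is proved large enough below
def pvLoopA (adj : List (Int × List Int)) :
    Nat → List Int → PySem.Set Int → Int → Int
  | 0, _, _, depth => depth
  | fuel + 1, level, visited, depth =>
    if level.isEmpty then depth
    else
      let st := level.foldl (pvStepA adj) (visited, [])
      pvLoopA adj fuel st.2 st.1 (if st.2.isEmpty then depth else depth + 1)

def bfs_depth_py (root : Int) (adj : List (Int × List Int)) : Int :=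
  pvLoopA adj ((adj.map (fun p => p.2.length)).sum + 2) [root] (PySem.Set.ofList [root]) 0

-- ===== PORT B =====
-- B's while-loop over the single queue of (node, depth) pairs; the index cursor i of
-- Source B is modelled exactly by consuming the already-read front of the queue; fuel
-- ((number of neighbour entries)+1) only makes the loop total
def pvLoopB (adj : List (Int × List Int)) :
    Nat → List (Int × Int) → PySem.Set Int → Int → Int
  | 0, _, _, depth => depth
  | _ + 1, [], _, depth => depth
  | fuel + 1, (node, d) :: rest, visited, _ =>
    let st := (pvNbs adj node).foldl
      (fun st' nb => if st'.1.contains nb then st' else (st'.1.add nb, st'.2 ++ [(nb, d + 1)]))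
      (visited, rest)
    pvLoopB adj fuel st.2 st.1 d

def bfs_depth_py_alt (root : Int) (adj : List (Int × List Int)) : Int :=
  pvLoopB adj ((adj.map (fun p => p.2.length)).sum + 1) [(root, 0)] (PySem.Set.ofList [root]) 0

-- ===== PRECONDITION & SPEC =====
def Spec_bfs_depth_py (root : Int) (adj : List (Int × List Int)) (out : Int) : Prop := out = bfs_depth_py_alt root adj
instance (root : Int) (adj : List (Int × List Int)) (out : Int) : Decidable (Spec_bfs_depth_py root adj out) := by unfold Spec_bfs_depth_py; infer_instance

-- ===== CLAIM (what is proved, stated in full; the proofs are below) =====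
def Claim_equal_bfs_depth_py : Prop := ∀ (root : Int) (adj : List (Int × List Int)), Dom_bfs_depth_py root adj → Spec_bfs_depth_py root adj (bfs_depth_py root adj)

-- ===== LEMMAS AND PROOFS =====

-- all neighbour entries of adj, and their number
def pvAll (adj : List (Int × List Int)) : List Int := (adj.map Prod.snd).flatten
def pvS (adj : List (Int × List Int)) : Nat := (pvAll adj).length

-- the visited set is duplicate-free and contained in {root} ∪ neighbours
def pvInv (root : Int) (adj : List (Int × List Int)) (v : PySem.Set Int) : Prop :=
  v.Nodup ∧ ∀ x ∈ v, x ∈ root :: pvAll adj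

lemma pvS_eq (adj : List (Int × List Int)) :
    pvS adj = (adj.map (fun p => p.2.length)).sum := by
  simp [pvS, pvAll, List.length_flatten, List.map_map, Function.comp_def]

lemma pvLoopA_nil (adj : List (Int × List Int)) (f : Nat) (v : PySem.Set Int) (d : Int) :
    pvLoopA adj f [] v d = d := by
  cases f <;> simp [pvLoopA]

lemma pvLoopB_nil (adj : List (Int × List Int)) (f : Nat) (v : PySem.Set Int) (d : Int) :
    pvLoopB adj f [] v d = d := by
  cases f <;> simp [pvLoopB]

lemma pvLoopA_succ_eq (adj : List (Int × List Int)) (f : Nat) (level : List Int)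
    (v : PySem.Set Int) (depth : Int) :
    pvLoopA adj (f + 1) level v depth
      = if level.isEmpty then depth
        else pvLoopA adj f (level.foldl (pvStepA adj) (v, [])).2
               (level.foldl (pvStepA adj) (v, [])).1
               (if (level.foldl (pvStepA adj) (v, [])).2.isEmpty then depth else depth + 1) := rfl

lemma pvLoopB_cons_eq (adj : List (Int × List Int)) (f : Nat) (node d : Int)
    (rest : List (Int × Int)) (visited : PySem.Set Int) (depth : Int) :
    pvLoopB adj (f + 1) ((node, d) :: rest) visited depth
      = pvLoopB adj f
          ((pvNbs adj node).foldl
            (fun st' nb => if st'.1.contains nb then st' else (st'.1.add nb, st'.2 ++ [(nb, d + 1)]))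
            (visited, rest)).2
          ((pvNbs adj node).foldl
            (fun st' nb => if st'.1.contains nb then st' else (st'.1.add nb, st'.2 ++ [(nb, d + 1)]))
            (visited, rest)).1
          d := rfl

lemma pvNbs_sub (adj : List (Int × List Int)) (node : Int) :
    ∀ x ∈ pvNbs adj node, x ∈ pvAll adj := by
  induction adj with
  | nil => simp [pvNbs, PySem.Dict.getD, PySem.Dict.get?, pvAll]
  | cons p rest ih =>
      intro x hx
      rw [pvNbs, PySem.Dict.getD_eq_get?_getD] at hx
      obtain ⟨k, w⟩ := p
      rw [PySem.Dict.get?_mk_cons] at hx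
      by_cases hk : (k == node) = true
      · simp [hk, pvAll] at hx ⊢
        exact Or.inl hx
      · simp only [hk] at hx
        have hx' : x ∈ pvNbs rest node := by
          rw [pvNbs, PySem.Dict.getD_eq_get?_getD]; simpa using hx
        have := ih x hx'
        simp [pvAll] at this ⊢
        exact Or.inr this

-- A's inner neighbour fold only appends to the accumulator list
lemma pvFoldA_shift (nbs : List Int) :
    ∀ (v : PySem.Set Int) (a : List Int),
      nbs.foldl (fun st' nb => if st'.1.contains nb then st' else (st'.1.add nb, st'.2 ++ [nb])) (v, a)
      = ((nbs.foldl (fun st' nb => if st'.1.contains nb then st' else (st'.1.add nb, st'.2 ++ [nb])) (v, [])).1,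
         a ++ (nbs.foldl (fun st' nb => if st'.1.contains nb then st' else (st'.1.add nb, st'.2 ++ [nb])) (v, [])).2) := by
  induction nbs with
  | nil => simp
  | cons nb rest ih =>
      intro v a
      by_cases h : v.contains nb = true
      · simp only [List.foldl_cons, h, if_pos]
        exact ih v a
      · simp only [List.foldl_cons, h, if_neg, Bool.false_eq_true, not_false_iff]
        rw [ih (v.add nb) (a ++ [nb]), ih (v.add nb) ([] ++ [nb])]
        simp

lemma pvStepA_shift (adj : List (Int × List Int)) (node : Int) (v : PySem.Set Int) (a : List Int) :
    pvStepA adj (v, a) node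
      = ((pvStepA adj (v, []) node).1, a ++ (pvStepA adj (v, []) node).2) := by
  simpa [pvStepA] using pvFoldA_shift (pvNbs adj node) v a

-- B's inner neighbour fold is A's with the new entries tagged with depth d+1
lemma pvFoldB_eq (nbs : List Int) (d : Int) :
    ∀ (v : PySem.Set Int) (q : List (Int × Int)),
      nbs.foldl (fun st' nb => if st'.1.contains nb then st' else (st'.1.add nb, st'.2 ++ [(nb, d + 1)])) (v, q)
      = ((nbs.foldl (fun st' nb => if st'.1.contains nb then st' else (st'.1.add nb, st'.2 ++ [nb])) (v, [])).1,
         q ++ ((nbs.foldl (fun st' nb => if st'.1.contains nb then st' else (st'.1.add nb, st'.2 ++ [nb])) (v, [])).2.map (fun x => (x, d + 1)))) := by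
  induction nbs with
  | nil => simp
  | cons nb rest ih =>
      intro v q
      by_cases h : v.contains nb = true
      · simp only [List.foldl_cons, h, if_pos]
        exact ih v q
      · simp only [List.foldl_cons, h, if_neg, Bool.false_eq_true, not_false_iff]
        rw [ih (v.add nb) (q ++ [(nb, d + 1)]),
            pvFoldA_shift rest (v.add nb) ([] ++ [nb])]
        simp

-- what the raw neighbour fold does to the visited set
lemma pvFoldA_spec (nbs : List Int) :
    ∀ (v : PySem.Set Int), v.Nodup →
      (nbs.foldl (fun st' nb => if st'.1.contains nb then st' else (st'.1.add nb, st'.2 ++ [nb])) (v, [])).1.Nodup ∧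
      (nbs.foldl (fun st' nb => if st'.1.contains nb then st' else (st'.1.add nb, st'.2 ++ [nb])) (v, [])).1.length
        = v.length + (nbs.foldl (fun st' nb => if st'.1.contains nb then st' else (st'.1.add nb, st'.2 ++ [nb])) (v, [])).2.length ∧
      (∀ x, x ∈ (nbs.foldl (fun st' nb => if st'.1.contains nb then st' else (st'.1.add nb, st'.2 ++ [nb])) (v, [])).1
        ↔ x ∈ v ∨ x ∈ (nbs.foldl (fun st' nb => if st'.1.contains nb then st' else (st'.1.add nb, st'.2 ++ [nb])) (v, [])).2) ∧
      (∀ x ∈ (nbs.foldl (fun st' nb => if st'.1.contains nb then st' else (st'.1.add nb, st'.2 ++ [nb])) (v, [])).2, x ∈ nbs) := by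
  induction nbs with
  | nil => intro v hv; simp [hv]
  | cons nb rest ih =>
      intro v hv
      by_cases h : v.contains nb = true
      · simp only [List.foldl_cons, h, if_pos]
        obtain ⟨h1, h2, h3, h4⟩ := ih v hv
        exact ⟨h1, h2, h3, fun x hx => List.mem_cons_of_mem _ (h4 x hx)⟩
      · have hnb : nb ∉ v := fun hmem => h ((PySem.Set.contains_iff v nb).2 hmem)
        have hadd : v.add nb = v ++ [nb] := PySem.Set.add_of_not_mem hnb
        have hvn : (v.add nb).Nodup := PySem.Set.nodup_add v nb hv
        have hlen : (v.add nb).length = v.length + 1 := by rw [hadd]; simp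
        simp only [List.foldl_cons, h, if_neg, Bool.false_eq_true, not_false_iff]
        rw [pvFoldA_shift rest (v.add nb) ([] ++ [nb])]
        obtain ⟨h1, h2, h3, h4⟩ := ih (v.add nb) hvn
        refine ⟨h1, ?_, ?_, ?_⟩
        · simp only [List.length_append, List.nil_append, List.length_cons, List.length_nil] at *
          omega
        · intro x
          have hmem : x ∈ v.add nb ↔ x ∈ v ∨ x = nb := PySem.Set.mem_add v nb x
          rw [h3 x, hmem]
          simp
          tauto
        · intro x hx
          simp only [List.nil_append, List.cons_append, List.mem_cons] at hx
          rcases hx with hx | hx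
          · simp [hx]
          · exact List.mem_cons_of_mem _ (h4 x hx)

-- what one node's expansion does to the visited set
lemma pvStepA_spec (adj : List (Int × List Int)) (node : Int) :
    ∀ (v : PySem.Set Int), v.Nodup →
      (pvStepA adj (v, []) node).1.Nodup ∧
      (pvStepA adj (v, []) node).1.length = v.length + (pvStepA adj (v, []) node).2.length ∧
      (∀ x, x ∈ (pvStepA adj (v, []) node).1 ↔ x ∈ v ∨ x ∈ (pvStepA adj (v, []) node).2) ∧
      (∀ x ∈ (pvStepA adj (v, []) node).2, x ∈ pvAll adj) := by
  intro v hv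
  obtain ⟨h1, h2, h3, h4⟩ := pvFoldA_spec (pvNbs adj node) v hv
  exact ⟨h1, h2, h3, fun x hx => pvNbs_sub adj node x (h4 x hx)⟩

lemma pvLevel_shift (adj : List (Int × List Int)) (level : List Int) :
    ∀ (v : PySem.Set Int) (a : List Int),
      level.foldl (pvStepA adj) (v, a)
      = ((level.foldl (pvStepA adj) (v, [])).1, a ++ (level.foldl (pvStepA adj) (v, [])).2) := by
  induction level with
  | nil => simp
  | cons x xs ih =>
      intro v a
      rw [List.foldl_cons, List.foldl_cons, pvStepA_shift adj x v a,
          show pvStepA adj (v, []) x = ((pvStepA adj (v, []) x).1, (pvStepA adj (v, []) x).2) from rfl,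
          ih _ (a ++ (pvStepA adj (v, []) x).2), ih _ ((pvStepA adj (v, []) x).2)]
      simp

-- what one whole level's expansion does to the visited set
lemma pvLevel_spec (adj : List (Int × List Int)) (level : List Int) :
    ∀ (v : PySem.Set Int), v.Nodup →
      (level.foldl (pvStepA adj) (v, [])).1.Nodup ∧
      (level.foldl (pvStepA adj) (v, [])).1.length = v.length + (level.foldl (pvStepA adj) (v, [])).2.length ∧
      (∀ x, x ∈ (level.foldl (pvStepA adj) (v, [])).1 ↔ x ∈ v ∨ x ∈ (level.foldl (pvStepA adj) (v, [])).2) ∧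
      (∀ x ∈ (level.foldl (pvStepA adj) (v, [])).2, x ∈ pvAll adj) := by
  induction level with
  | nil => intro v hv; simp [hv]
  | cons x xs ih =>
      intro v hv
      obtain ⟨s1, s2, s3, s4⟩ := pvStepA_spec adj x v hv
      rw [List.foldl_cons,
          show pvStepA adj (v, []) x = ((pvStepA adj (v, []) x).1, (pvStepA adj (v, []) x).2) from rfl,
          pvLevel_shift adj xs _ ((pvStepA adj (v, []) x).2)]
      obtain ⟨h1, h2, h3, h4⟩ := ih (pvStepA adj (v, []) x).1 s1
      refine ⟨h1, ?_, ?_, ?_⟩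
      · simp only [List.length_append] at *
        omega
      · intro y
        rw [h3 y, s3 y]
        simp
        tauto
      · intro y hy
        rcases List.mem_append.1 hy with hy | hy
        · exact s4 y hy
        · exact h4 y hy

lemma pvLen_le (root : Int) (adj : List (Int × List Int)) (v : PySem.Set Int)
    (h : pvInv root adj v) : v.length ≤ 1 + pvS adj := by
  have := List.Subperm.length_le (List.subperm_of_subset h.1 h.2)
  simp only [List.length_cons, pvS] at this ⊢
  omega

lemma pvInv_level (root : Int) (adj : List (Int × List Int)) (level : List Int)
    (v : PySem.Set Int) (h : pvInv root adj v) :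
    pvInv root adj (level.foldl (pvStepA adj) (v, [])).1 := by
  obtain ⟨h1, h2, h3, h4⟩ := pvLevel_spec adj level v h.1
  refine ⟨h1, fun x hx => ?_⟩
  rcases (h3 x).1 hx with hx' | hx'
  · exact h.2 x hx'
  · exact List.mem_cons_of_mem _ (h4 x hx')

-- A's loop is fuel-stable above the threshold (unvisited capacity)+2
lemma pvLoopA_succ (root : Int) (adj : List (Int × List Int)) :
    ∀ (f : Nat) (level : List Int) (v : PySem.Set Int) (depth : Int),
      pvInv root adj v → (1 + pvS adj) - v.length + 2 ≤ f →
      pvLoopA adj (f + 1) level v depth = pvLoopA adj f level v depth := by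
  intro f
  induction f with
  | zero => intro level v depth _ hf; exact absurd hf (by omega)
  | succ f ih =>
      intro level v depth hInv hf
      conv_lhs => rw [pvLoopA_succ_eq adj (f + 1)]
      conv_rhs => rw [pvLoopA_succ_eq adj f]
      by_cases hl : level.isEmpty
      · simp only [hl, if_pos]
      · simp only [hl, Bool.false_eq_true, if_neg, not_false_iff]
        obtain ⟨h1, h2, h3, h4⟩ := pvLevel_spec adj level v hInv.1
        have hInv' := pvInv_level root adj level v hInv
        have hb := pvLen_le root adj _ hInv'
        by_cases hst : (level.foldl (pvStepA adj) (v, [])).2.isEmpty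
        · have he : (level.foldl (pvStepA adj) (v, [])).2 = [] := List.isEmpty_iff.1 hst
          rw [he, pvLoopA_nil, pvLoopA_nil]
        · have hne : (level.foldl (pvStepA adj) (v, [])).2 ≠ [] := fun h => hst (by simp [h])
          have hlen : 0 < (level.foldl (pvStepA adj) (v, [])).2.length :=
            List.length_pos_of_ne_nil hne
          exact ih _ _ _ hInv' (by omega)

lemma pvLoopA_fuel_eq (root : Int) (adj : List (Int × List Int))
    (f₁ f₂ : Nat) (level : List Int) (v : PySem.Set Int) (depth : Int)
    (h : pvInv root adj v)
    (h₁ : (1 + pvS adj) - v.length + 2 ≤ f₁) (h₂ : (1 + pvS adj) - v.length + 2 ≤ f₂) :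
    pvLoopA adj f₁ level v depth = pvLoopA adj f₂ level v depth := by
  have key : ∀ k, pvLoopA adj ((1 + pvS adj) - v.length + 2 + k) level v depth
      = pvLoopA adj ((1 + pvS adj) - v.length + 2) level v depth := by
    intro k
    induction k with
    | zero => rfl
    | succ k ih =>
        have hs := pvLoopA_succ root adj ((1 + pvS adj) - v.length + 2 + k) level v depth h (by omega)
        calc pvLoopA adj ((1 + pvS adj) - v.length + 2 + (k + 1)) level v depth
            = pvLoopA adj ((1 + pvS adj) - v.length + 2 + k + 1) level v depth := by ring_nf
          _ = pvLoopA adj ((1 + pvS adj) - v.length + 2 + k) level v depth := hs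
          _ = pvLoopA adj ((1 + pvS adj) - v.length + 2) level v depth := ih
  have e₁ : f₁ = (1 + pvS adj) - v.length + 2 + (f₁ - ((1 + pvS adj) - v.length + 2)) := by omega
  have e₂ : f₂ = (1 + pvS adj) - v.length + 2 + (f₂ - ((1 + pvS adj) - v.length + 2)) := by omega
  rw [e₁, e₂, key, key]

lemma pvLoopA_step (adj : List (Int × List Int)) (f : Nat) (level : List Int)
    (v : PySem.Set Int) (depth : Int) (h : level ≠ []) :
    pvLoopA adj (f + 1) level v depth
      = pvLoopA adj f (level.foldl (pvStepA adj) (v, [])).2 (level.foldl (pvStepA adj) (v, [])).1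
          (if (level.foldl (pvStepA adj) (v, [])).2.isEmpty then depth else depth + 1) := by
  rw [pvLoopA_succ_eq, if_neg (by simp [h])]

-- the bridge: B's mixed queue (rest of the current level at depth d, then the
-- partially built next level at depth d+1) against A's level recursion
lemma pvMain (root : Int) (adj : List (Int × List Int)) :
    ∀ (f : Nat) (l nl : List Int) (v : PySem.Set Int) (d last : Int),
      l ≠ [] → pvInv root adj v →
      l.length + nl.length + ((1 + pvS adj) - v.length) ≤ f →
      pvLoopB adj f (l.map (fun x => (x, d)) ++ nl.map (fun x => (x, d + 1))) v last
      = (if (l.foldl (pvStepA adj) (v, nl)).2.isEmpty then d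
         else pvLoopA adj ((1 + pvS adj) - (l.foldl (pvStepA adj) (v, nl)).1.length + 2)
                (l.foldl (pvStepA adj) (v, nl)).2 (l.foldl (pvStepA adj) (v, nl)).1 (d + 1)) := by
  intro f
  induction f with
  | zero =>
      intro l nl v d last hl _ hf
      have := List.length_pos_of_ne_nil hl
      omega
  | succ f ih =>
      intro l nl v d last hl hInv hf
      obtain ⟨x, xs, rfl⟩ : ∃ x xs, l = x :: xs := by
        cases l with
        | nil => exact absurd rfl hl
        | cons a b => exact ⟨a, b, rfl⟩
      rw [List.map_cons, List.cons_append, pvLoopB_cons_eq,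
          pvFoldB_eq (pvNbs adj x) d]
      have hraw : (pvNbs adj x).foldl
          (fun st' nb => if st'.1.contains nb then st' else (st'.1.add nb, st'.2 ++ [nb])) (v, [])
          = pvStepA adj (v, []) x := rfl
      rw [hraw, List.foldl_cons, pvStepA_shift adj x v nl]
      obtain ⟨pn, plen, pmem, psub⟩ := pvStepA_spec adj x v hInv.1
      have hInv1 : pvInv root adj (pvStepA adj (v, []) x).1 := by
        refine ⟨pn, fun y hy => ?_⟩
        rcases (pmem y).1 hy with h | h
        · exact hInv.2 y h
        · exact List.mem_cons_of_mem _ (psub y h)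
      have hb1 := pvLen_le root adj _ hInv1
      cases xs with
      | cons y ys =>
          have hq : (List.map (fun x => (x, d)) (y :: ys) ++ List.map (fun x => (x, d + 1)) nl)
                ++ List.map (fun x => (x, d + 1)) (pvStepA adj (v, []) x).2
              = List.map (fun x => (x, d)) (y :: ys)
                ++ List.map (fun x => (x, d + 1)) (nl ++ (pvStepA adj (v, []) x).2) := by
            rw [List.map_append, List.append_assoc]
          rw [hq]
          exact ih (y :: ys) (nl ++ (pvStepA adj (v, []) x).2) (pvStepA adj (v, []) x).1 d d
            (by simp) hInv1
            (by simp only [List.length_cons, List.length_append] at hf ⊢; omega)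
      | nil =>
          simp only [List.map_nil, List.nil_append, List.foldl_nil]
          rw [← List.map_append]
          by_cases hnl : nl ++ (pvStepA adj (v, []) x).2 = []
          · rw [hnl]
            simp only [List.map_nil]
            rw [pvLoopB_nil]
            simp
          · rw [if_neg (by simp [hnl])]
            have hIH := ih (nl ++ (pvStepA adj (v, []) x).2) [] (pvStepA adj (v, []) x).1
              (d + 1) d hnl hInv1
              (by simp only [List.length_cons, List.length_append, List.length_nil] at hf ⊢; omega)
            simp only [List.map_nil, List.append_nil] at hIH
            rw [hIH,
                show (1 + pvS adj) - (pvStepA adj (v, []) x).1.length + 2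
                  = ((1 + pvS adj) - (pvStepA adj (v, []) x).1.length + 1) + 1 from rfl]
            conv_rhs => rw [pvLoopA_step adj _ _ _ _ hnl]
            obtain ⟨r1, r2, r3, r4⟩ := pvLevel_spec adj (nl ++ (pvStepA adj (v, []) x).2)
              (pvStepA adj (v, []) x).1 pn
            have hInvr := pvInv_level root adj (nl ++ (pvStepA adj (v, []) x).2)
              (pvStepA adj (v, []) x).1 hInv1
            have hbr := pvLen_le root adj _ hInvr
            by_cases hr : ((nl ++ (pvStepA adj (v, []) x).2).foldl (pvStepA adj)
                ((pvStepA adj (v, []) x).1, [])).2.isEmpty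
            · rw [if_pos hr, if_pos hr, List.isEmpty_iff.1 hr, pvLoopA_nil]
            · rw [if_neg hr, if_neg hr]
              have hlr : 0 < ((nl ++ (pvStepA adj (v, []) x).2).foldl (pvStepA adj)
                  ((pvStepA adj (v, []) x).1, [])).2.length := by
                apply List.length_pos_of_ne_nil
                intro h
                exact hr (by rw [h]; rfl)
              exact pvLoopA_fuel_eq root adj _ _ _ _ _ hInvr (by omega) (by omega)

-- ===== VERDICT (by name: the statement is the Claim_ definition above) =====
theorem bfs_depth_py_spec : Claim_equal_bfs_depth_py := by
  unfold Claim_equal_bfs_depth_py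
  intro root adj _
  unfold Spec_bfs_depth_py bfs_depth_py bfs_depth_py_alt
  rw [← pvS_eq adj]
  rw [show (PySem.Set.ofList [root] : PySem.Set Int) = [root] from rfl]
  have hInv : pvInv root adj [root] := by
    refine ⟨List.nodup_singleton root, fun x hx => ?_⟩
    simp only [List.mem_singleton] at hx
    simp [hx]
  have hmain := pvMain root adj (pvS adj + 1) [root] [] [root] 0 0 (by simp) hInv
    (by simp only [List.length_cons, List.length_nil]; omega)
  simp only [List.map_cons, List.map_nil, List.append_nil] at hmain
  rw [hmain, show pvS adj + 2 = (pvS adj + 1) + 1 from rfl,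
      pvLoopA_step adj (pvS adj + 1) [root] [root] 0 (by simp)]
  obtain ⟨r1, r2, r3, r4⟩ := pvLevel_spec adj [root] [root] (List.nodup_singleton root)
  have hInvr := pvInv_level root adj [root] [root] hInv
  have hbr := pvLen_le root adj _ hInvr
  by_cases hr : (List.foldl (pvStepA adj) ([root], []) [root]).2.isEmpty
  · rw [if_pos hr, if_pos hr, List.isEmpty_iff.1 hr, pvLoopA_nil]
  · rw [if_neg hr, if_neg hr]
    have hlr : 0 < (List.foldl (pvStepA adj) ([root], []) [root]).2.length := by
      apply List.length_pos_of_ne_nil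
      intro h
      exact hr (by rw [h]; rfl)
    have hrl : List.length (List.foldl (pvStepA adj) ([root], []) [root]).1
        = 1 + (List.foldl (pvStepA adj) ([root], []) [root]).2.length := by
      simpa using r2
    exact pvLoopA_fuel_eq root adj _ _ _ _ _ hInvr (by omega) (by omega)
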